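-- pv_equiv track=rewrite | github.com/Ary300/kcnq-tractability-pipeline | kcnq_pipeline/benchmarking.py | _conservation_status
-- ===== SOURCE A (Python) =====
-- AA_GROUPS = {
--     "A": "hydrophobic",
--     "V": "hydrophobic",
--     "L": "hydrophobic",
--     "I": "hydrophobic",
--     "M": "hydrophobic",
--     "F": "aromatic",
--     "W": "aromatic",
--     "Y": "aromatic",
--     "S": "polar",
--     "T": "polar",
--     "N": "polar",
--     "Q": "polar",
--     "K": "basic",
--     "R": "basic",
--     "H": "basic",
--     "D": "acidic",
--     "E": "acidic",
--     "C": "special",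
--     "G": "special",
--     "P": "special",
-- }
--
-- def _conservation_status(column_aas: list[str], wt_aa: str) -> str:
--     nongap = [aa for aa in column_aas if aa != "-"]
--     if not nongap:
--         return "unresolved"
--     if all(aa == wt_aa for aa in nongap):
--         return "identical"
--     wt_group = AA_GROUPS.get(wt_aa, "other")
--     if all((aa == wt_aa) or (AA_GROUPS.get(aa, "other") == wt_group) for aa in nongap):
--         return "conservative"
--     return "variable"
-- ===== SOURCE B (Python) =====
-- AA_GROUPS = {
--     "A": "hydrophobic",
--     "V": "hydrophobic",
--     "L": "hydrophobic",
--     "I": "hydrophobic",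
--     "M": "hydrophobic",
--     "F": "aromatic",
--     "W": "aromatic",
--     "Y": "aromatic",
--     "S": "polar",
--     "T": "polar",
--     "N": "polar",
--     "Q": "polar",
--     "K": "basic",
--     "R": "basic",
--     "H": "basic",
--     "D": "acidic",
--     "E": "acidic",
--     "C": "special",
--     "G": "special",
--     "P": "special",
-- }
--
-- def _conservation_status(column_aas: list[str], wt_aa: str) -> str:
--     # single pass: count non-gaps and maintain two flags
--     wt_group = AA_GROUPS.get(wt_aa, "other")
--     count = 0
--     identical = True
--     conservative = True
--     for aa in column_aas:
--         if aa == "-":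
--             continue
--         count += 1
--         if aa != wt_aa:
--             identical = False
--             if AA_GROUPS.get(aa, "other") != wt_group:
--                 conservative = False
--     if count == 0:
--         return "unresolved"
--     if identical:
--         return "identical"
--     if conservative:
--         return "conservative"
--     return "variable"
-- ===== Notes on version B (the rewrite author's own statement) =====
-- stated objective: simpler
-- what changed: Replaced the filter pass plus two separate all()-scans with one loop over the column that counts non-gaps and maintains two boolean flags (identical, conservative), deciding the status from them afterwards.
import Mathlib
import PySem

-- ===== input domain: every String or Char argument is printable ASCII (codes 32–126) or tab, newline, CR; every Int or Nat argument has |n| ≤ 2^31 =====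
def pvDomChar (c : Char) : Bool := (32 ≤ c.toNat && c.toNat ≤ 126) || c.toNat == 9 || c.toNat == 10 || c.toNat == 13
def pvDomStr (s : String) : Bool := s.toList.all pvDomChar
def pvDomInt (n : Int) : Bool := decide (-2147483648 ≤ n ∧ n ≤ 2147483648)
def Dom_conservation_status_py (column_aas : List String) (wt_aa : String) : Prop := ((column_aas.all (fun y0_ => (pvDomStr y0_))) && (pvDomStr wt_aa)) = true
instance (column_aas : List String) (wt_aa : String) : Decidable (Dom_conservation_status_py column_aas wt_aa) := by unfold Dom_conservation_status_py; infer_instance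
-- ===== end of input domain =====

-- B replaces A's filter pass plus two all()-scans by a single loop maintaining a non-gap count and two boolean flags (objective: simpler).


-- ===== PORT A =====
def AA_GROUPS_lean : PySem.Dict String String :=
  PySem.Dict.ofList [("A","hydrophobic"),("V","hydrophobic"),("L","hydrophobic"),("I","hydrophobic"),("M","hydrophobic"),
   ("F","aromatic"),("W","aromatic"),("Y","aromatic"),
   ("S","polar"),("T","polar"),("N","polar"),("Q","polar"),
   ("K","basic"),("R","basic"),("H","basic"),
   ("D","acidic"),("E","acidic"),
   ("C","special"),("G","special"),("P","special")]

def conservation_status_py (column_aas : List String) (wt_aa : String) : String :=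
  let nongap := column_aas.filter (fun aa => aa != "-")
  if nongap = [] then "unresolved"
  else if nongap.all (fun aa => aa == wt_aa) then "identical"
  else
    let wt_group := PySem.Dict.getD AA_GROUPS_lean wt_aa "other"
    if nongap.all (fun aa => (aa == wt_aa) || (PySem.Dict.getD AA_GROUPS_lean aa "other" == wt_group))
    then "conservative"
    else "variable"

-- ===== PORT B =====
-- single pass: count non-gaps and maintain two flags (transliteration of Source B)
def consStep (wt_aa wt_group : String) (s : Nat × Bool × Bool) (aa : String) : Nat × Bool × Bool :=
  if aa == "-" then s
  else
    let count := s.1 + 1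
    if aa != wt_aa then
      if PySem.Dict.getD AA_GROUPS_lean aa "other" != wt_group then (count, false, false)
      else (count, false, s.2.2)
    else (count, s.2.1, s.2.2)

def conservation_status_py_alt (column_aas : List String) (wt_aa : String) : String :=
  let wt_group := PySem.Dict.getD AA_GROUPS_lean wt_aa "other"
  let st := column_aas.foldl (consStep wt_aa wt_group) (0, true, true)
  if st.1 = 0 then "unresolved"
  else if st.2.1 then "identical"
  else if st.2.2 then "conservative"
  else "variable"

-- ===== PRECONDITION & SPEC =====
def Spec_conservation_status_py (column_aas : List String) (wt_aa : String) (out : String) : Prop := out = conservation_status_py_alt column_aas wt_aa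
instance (column_aas : List String) (wt_aa : String) (out : String) : Decidable (Spec_conservation_status_py column_aas wt_aa out) := by unfold Spec_conservation_status_py; infer_instance

-- ===== CLAIM (what is proved, stated in full; the proofs are below) =====
def Claim_equal_conservation_status_py : Prop := ∀ (column_aas : List String) (wt_aa : String), Dom_conservation_status_py column_aas wt_aa → Spec_conservation_status_py column_aas wt_aa (conservation_status_py column_aas wt_aa)

-- ===== LEMMAS AND PROOFS =====
theorem consStep_fold (wt g : String) (l : List String) (n : Nat) (b1 b2 : Bool) :
    l.foldl (consStep wt g) (n, b1, b2) =
      (n + (l.filter (fun aa => aa != "-")).length,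
       b1 && (l.filter (fun aa => aa != "-")).all (fun aa => aa == wt),
       b2 && (l.filter (fun aa => aa != "-")).all
              (fun aa => (aa == wt) || (PySem.Dict.getD AA_GROUPS_lean aa "other" == g))) := by
  induction l generalizing n b1 b2 with
  | nil => simp
  | cons aa rest ih =>
    simp only [List.foldl_cons, consStep, List.filter_cons]
    by_cases hgap : aa = "-"
    · simp [hgap, ih]
    · by_cases hwt : aa = wt
      · subst hwt; simp [hgap, ih]; omega
      · by_cases hg : PySem.Dict.getD AA_GROUPS_lean aa "other" = g
        · simp [hgap, hwt, hg, ih, Nat.add_assoc, Nat.add_comm 1]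
        · simp [hgap, hwt, hg, ih, Nat.add_assoc, Nat.add_comm 1]

-- ===== VERDICT (by name: the statement is the Claim_ definition above) =====
theorem conservation_status_py_spec : Claim_equal_conservation_status_py := by
  intro column_aas wt_aa _
  unfold Spec_conservation_status_py conservation_status_py conservation_status_py_alt
  simp only [consStep_fold]
  simp only [Bool.true_and, Nat.zero_add]
  by_cases hempty : column_aas.filter (fun aa => aa != "-") = []
  · simp [hempty]
  · have hlen : (column_aas.filter (fun aa => aa != "-")).length ≠ 0 := by
      simpa [List.length_eq_zero_iff] using hempty
    by_cases h1 : (column_aas.filter (fun aa => aa != "-")).all (fun aa => aa == wt_aa)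
    · simp [hempty, hlen, h1]
    · simp [hempty, hlen, h1]
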